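-- pv_equiv track=rewrite | github.com/migachi16/simple-calculator | src/helper_funcs.py | degree_mode
-- ===== SOURCE A (Python) =====
-- def degree_mode(expression: list) -> list:
--     """ Modify the expression list for degree mode, since math trig functions
--     operate on radians"""
--
--     paren_track = []
--     for i, element in enumerate(expression):
--         if element in ('math.sin(', 'math.cos(', 'math.tan('):
--             expression.insert(i + 1, 'math.radians(')
--             for j in range(i + 2, len(expression)):
--                 if expression[j] in ('math.sin(', 'math.cos(', 'math.tan(', 'math.sqrt(', '('):
--                     paren_track.append(1)
--                 if expression[j] == ')':
--                     try:
--                         paren_track.pop()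
--                     except(IndexError):
--                         expression.insert(j, ')')
--                         break
--     return expression
-- ===== SOURCE B (Python) =====
-- def degree_mode(expression: list) -> list:
--     """ Modify the expression list for degree mode, since math trig functions
--     operate on radians"""
--
--     out = []
--     stack = []  # True for a trig open (needs an extra closing paren), False otherwise
--     for element in expression:
--         if element in ('math.sin(', 'math.cos(', 'math.tan('):
--             out.append(element)
--             out.append('math.radians(')
--             stack.append(True)
--         elif element in ('math.sqrt(', '('):
--             out.append(element)
--             stack.append(False)
--         elif element == ')':
--             out.append(')')
--             if stack and stack.pop():
--                 out.append(')')
--         else: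
--             out.append(element)
--     return out
-- ===== Notes on version B (the rewrite author's own statement) =====
-- stated objective: alternative
-- what changed: B replaces A's in-place insertion loop with per-trig rescans of the rest of the list by a single left-to-right pass that pushes a True/False marker per open token and emits the extra ')' when a trig marker is popped; Pre_ restricts to the function's natural domain: well-formed expressions (every open token has its matching ')') plus any list with at most one trig token — on malformed input with several trig calls no placement of the inserted parens is specified and A and B may place them differently.
import Mathlib
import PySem

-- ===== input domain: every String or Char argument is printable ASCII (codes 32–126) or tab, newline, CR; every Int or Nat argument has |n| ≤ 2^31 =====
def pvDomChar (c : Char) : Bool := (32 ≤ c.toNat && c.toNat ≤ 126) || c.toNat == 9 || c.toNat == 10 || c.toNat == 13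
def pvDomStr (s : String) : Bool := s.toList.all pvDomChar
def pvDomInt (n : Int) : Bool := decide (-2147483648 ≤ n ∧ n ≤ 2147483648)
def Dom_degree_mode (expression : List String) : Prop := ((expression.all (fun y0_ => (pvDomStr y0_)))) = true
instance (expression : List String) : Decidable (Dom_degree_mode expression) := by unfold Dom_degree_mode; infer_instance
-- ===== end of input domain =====

-- B replaces A's per-trig rescans of the mutated list by one left-to-right pass with a Bool
-- stack (objective: alternative). A mutates its argument in place; the equivalence proved here
-- is about the RETURN value only (B does not mutate).

-- ===== PORT A =====

-- 'element in ('math.sin(', 'math.cos(', 'math.tan(')'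
def pvIsTrig (y : String) : Bool :=
  y == "math.sin(" || y == "math.cos(" || y == "math.tan("

-- 'expression[j] in ('math.sin(', 'math.cos(', 'math.tan(', 'math.sqrt(', '(')'
def pvIsOpen (y : String) : Bool :=
  pvIsTrig y || y == "math.sqrt(" || y == "("

-- number of trig tokens in a list (termination measure helper for the outer loop)
def pvTrigCount (l : List String) : Nat := l.countP pvIsTrig

-- A's inner loop 'for j in range(i + 2, len(expression))': walks the part of the list after the
-- inserted 'math.radians(' carrying paren_track (a stack of 1s; Python append/pop at the end =
-- cons/uncons here); on a ')' with an empty stack it inserts ')' before it and breaks.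
-- Returns (that part of the list after the loop, the final paren_track).
def pvScan : List String → List Int → List String × List Int
  | [], pt => ([], pt)
  | y :: ys, pt =>
    let pt1 := if pvIsOpen y then (1 : Int) :: pt else pt
    if y == ")" then
      match pt1 with
      | [] => (")" :: y :: ys, [])                   -- 'except IndexError: insert ')' at j; break'
      | _ :: t => let r := pvScan ys t; (y :: r.1, r.2)
    else
      let r := pvScan ys pt1; (y :: r.1, r.2)

theorem pvScan_length_le (ys : List String) (pt : List Int) :
    (pvScan ys pt).1.length ≤ ys.length + 1 := by
  induction ys generalizing pt with
  | nil => simp [pvScan]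
  | cons y ys ih =>
    simp only [pvScan]
    split
    · split
      · simp
      · simpa using Nat.succ_le_succ (ih _)
    · simpa using Nat.succ_le_succ (ih _)

theorem pvScan_trigCount (ys : List String) (pt : List Int) :
    pvTrigCount (pvScan ys pt).1 = pvTrigCount ys := by
  induction ys generalizing pt with
  | nil => simp [pvScan]
  | cons y ys ih =>
    simp only [pvScan]
    split
    · rename_i hy
      split
      · simp [pvTrigCount, List.countP_cons]
        decide
      · simp [pvTrigCount, List.countP_cons] at *
        simp [ih]
    · simp [pvTrigCount, List.countP_cons] at *
      simp [ih]

-- A's outer loop 'for i, element in enumerate(expression)' as a zipper over the (mutating) list: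
-- the head is expression[i]; on a trig token 'math.radians(' is inserted right after it and the
-- inner scan rewrites the rest; enumerate then continues at the inserted token.
def pvOuter : List String → List Int → List String
  | [], _ => []
  | y :: ys, pt =>
    if pvIsTrig y then
      let s := pvScan ys pt
      y :: pvOuter ("math.radians(" :: s.1) s.2
    else
      y :: pvOuter ys pt
termination_by l _ => l.length + 2 * pvTrigCount l
decreasing_by
  · have h1 := pvScan_length_le ys pt
    have h2 := pvScan_trigCount ys pt
    have hrad : pvTrigCount ("math.radians(" :: (pvScan ys pt).1) = pvTrigCount (pvScan ys pt).1 := by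
      simp [pvTrigCount, List.countP_cons]; decide
    have hy : pvTrigCount (y :: ys) = pvTrigCount ys + 1 := by
      simp [pvTrigCount, *]

    simp only [List.length_cons, hrad, h2, hy]
    omega
  · have hy : pvTrigCount (y :: ys) = pvTrigCount ys + (if pvIsTrig y then 1 else 0) := by
      simp [pvTrigCount, List.countP_cons]
    simp only [List.length_cons, hy]
    omega

def degree_mode (expression : List String) : List String :=
  pvOuter expression []

-- ===== PORT B =====

-- B's single pass: push true for a trig open, false for any other open; a ')' pops the top
-- marker and a popped true emits the extra ')'.
def pvGo : List String → List Bool → List String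
  | [], _ => []
  | y :: ys, st =>
    if pvIsTrig y then y :: "math.radians(" :: pvGo ys (true :: st)
    else if pvIsOpen y then y :: pvGo ys (false :: st)
    else if y == ")" then
      match st with
      | true :: st' => ")" :: ")" :: pvGo ys st'
      | false :: st' => ")" :: pvGo ys st'
      | [] => ")" :: pvGo ys []
    else y :: pvGo ys st

def degree_mode_alt (expression : List String) : List String :=
  pvGo expression []

-- ===== PRECONDITION & SPEC =====

-- Pre_ restricts to the function's natural domain: well-formed expressions (every open token
-- has its matching ')') plus any token list with at most one trig token. Excluded are only
-- malformed inputs with two or more trig calls, where no placement of the inserted parens is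
-- specified and the two implementations may place them differently.
-- pvBal ys d runs the standard paren balance (excess ')' clamped at 0).
def pvBal : List String → Nat → Nat
  | [], d => d
  | y :: ys, d =>
    if pvIsOpen y then pvBal ys (d + 1)
    else if y == ")" then pvBal ys (d - 1)
    else pvBal ys d

def Pre_degree_mode (expression : List String) : Prop :=
  pvBal expression 0 = 0 ∨ pvTrigCount expression ≤ 1
instance (expression : List String) : Decidable (Pre_degree_mode expression) := by
  unfold Pre_degree_mode; infer_instance

def pvWitness_degree_mode : List String := ["math.sin(", "2", "+", "(", "3", ")", ")"]

def Spec_degree_mode (expression : List String) (out : List String) : Prop := out = degree_mode_alt expression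
instance (expression : List String) (out : List String) : Decidable (Spec_degree_mode expression out) := by unfold Spec_degree_mode; infer_instance

-- ===== CLAIM (what is proved, stated in full; the proofs are below) =====
def Claim_equal_degree_mode : Prop := ∀ (expression : List String), Dom_degree_mode expression → Pre_degree_mode expression → Spec_degree_mode expression (degree_mode expression)

-- ===== LEMMAS AND PROOFS =====

-- Decoration: the list A is holding when its outer loop reaches a suffix ys of the original
-- input, st being B's marker stack there: an extra ')' sits right before the close of every
-- already-processed (true) pending trig.
def pvDec : List String → List Bool → List String
  | [], _ => []
  | y :: ys, st =>
    if pvIsOpen y then y :: pvDec ys (false :: st)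
    else if y == ")" then
      match st with
      | true :: st' => ")" :: ")" :: pvDec ys st'
      | false :: st' => ")" :: pvDec ys st'
      | [] => ")" :: pvDec ys []
    else y :: pvDec ys st

theorem pvIsOpen_ne_close (y : String) (h : pvIsOpen y = true) : (y == ")") = false := by
  by_contra hc
  simp only [Bool.not_eq_false, beq_iff_eq] at hc
  subst hc
  exact absurd h (by decide)

-- one-step unfolding lemmas for the recursive functions, by token class

theorem pvDec_open (y : String) (ys : List String) (st : List Bool) (h : pvIsOpen y = true) :
    pvDec (y :: ys) st = y :: pvDec ys (false :: st) := by simp [pvDec, h]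

theorem pvDec_close_true (ys : List String) (st : List Bool) :
    pvDec (")" :: ys) (true :: st) = ")" :: ")" :: pvDec ys st := by
  simp [pvDec, show pvIsOpen ")" = false by decide]

theorem pvDec_close_false (ys : List String) (st : List Bool) :
    pvDec (")" :: ys) (false :: st) = ")" :: pvDec ys st := by
  simp [pvDec, show pvIsOpen ")" = false by decide]

theorem pvDec_close_nil (ys : List String) :
    pvDec (")" :: ys) [] = ")" :: pvDec ys [] := by
  simp [pvDec, show pvIsOpen ")" = false by decide]

theorem pvDec_other (y : String) (ys : List String) (st : List Bool)
    (ho : pvIsOpen y = false) (hc : (y == ")") = false) :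
    pvDec (y :: ys) st = y :: pvDec ys st := by
  simp [pvDec, ho, hc]

theorem pvScan_open (y : String) (ys : List String) (pt : List Int) (h : pvIsOpen y = true) :
    pvScan (y :: ys) pt = (y :: (pvScan ys ((1 : Int) :: pt)).1, (pvScan ys ((1 : Int) :: pt)).2) := by
  simp [pvScan, h, pvIsOpen_ne_close y h]

theorem pvScan_close_pop (ys : List String) (p : Int) (pt : List Int) :
    pvScan (")" :: ys) (p :: pt) = (")" :: (pvScan ys pt).1, (pvScan ys pt).2) := by
  simp [pvScan, show pvIsOpen ")" = false by decide]

theorem pvScan_close_empty (ys : List String) :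
    pvScan (")" :: ys) [] = (")" :: ")" :: ys, []) := by
  simp [pvScan, show pvIsOpen ")" = false by decide]

theorem pvScan_other (y : String) (ys : List String) (pt : List Int)
    (ho : pvIsOpen y = false) (hc : (y == ")") = false) :
    pvScan (y :: ys) pt = (y :: (pvScan ys pt).1, (pvScan ys pt).2) := by
  simp [pvScan, ho, hc]

theorem pvOuter_trig (y : String) (ys : List String) (pt : List Int) (h : pvIsTrig y = true) :
    pvOuter (y :: ys) pt = y :: pvOuter ("math.radians(" :: (pvScan ys pt).1) (pvScan ys pt).2 := by
  rw [pvOuter]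
  simp [h]

theorem pvOuter_nontrig (y : String) (ys : List String) (pt : List Int) (h : pvIsTrig y = false) :
    pvOuter (y :: ys) pt = y :: pvOuter ys pt := by
  rw [pvOuter]
  simp [h]

theorem pvGo_trig (y : String) (ys : List String) (st : List Bool) (h : pvIsTrig y = true) :
    pvGo (y :: ys) st = y :: "math.radians(" :: pvGo ys (true :: st) := by simp [pvGo, h]

theorem pvGo_open (y : String) (ys : List String) (st : List Bool)
    (ht : pvIsTrig y = false) (ho : pvIsOpen y = true) :
    pvGo (y :: ys) st = y :: pvGo ys (false :: st) := by simp [pvGo, ht, ho]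

theorem pvGo_close_true (ys : List String) (st : List Bool) :
    pvGo (")" :: ys) (true :: st) = ")" :: ")" :: pvGo ys st := by
  simp [pvGo, show pvIsTrig ")" = false by decide, show pvIsOpen ")" = false by decide]

theorem pvGo_close_false (ys : List String) (st : List Bool) :
    pvGo (")" :: ys) (false :: st) = ")" :: pvGo ys st := by
  simp [pvGo, show pvIsTrig ")" = false by decide, show pvIsOpen ")" = false by decide]

theorem pvGo_close_nil (ys : List String) :
    pvGo (")" :: ys) [] = ")" :: pvGo ys [] := by
  simp [pvGo, show pvIsTrig ")" = false by decide, show pvIsOpen ")" = false by decide]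

theorem pvGo_other (y : String) (ys : List String) (st : List Bool)
    (ho : pvIsOpen y = false) (hc : (y == ")") = false) :
    pvGo (y :: ys) st = y :: pvGo ys st := by
  have ht : pvIsTrig y = false := by
    cases h : pvIsTrig y
    · rfl
    · simp [pvIsOpen, h] at ho
  simp [pvGo, ht, ho, hc]

theorem pvBal_open (y : String) (ys : List String) (d : Nat) (h : pvIsOpen y = true) :
    pvBal (y :: ys) d = pvBal ys (d + 1) := by simp [pvBal, h]

theorem pvBal_close (ys : List String) (d : Nat) :
    pvBal (")" :: ys) d = pvBal ys (d - 1) := by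
  simp [pvBal, show pvIsOpen ")" = false by decide]

theorem pvBal_other (y : String) (ys : List String) (d : Nat)
    (ho : pvIsOpen y = false) (hc : (y == ")") = false) :
    pvBal (y :: ys) d = pvBal ys d := by
  simp [pvBal, ho, hc]

theorem pvDec_allFalse (ys : List String) (st : List Bool)
    (h : ∀ b ∈ st, b = false) : pvDec ys st = ys := by
  induction ys generalizing st with
  | nil => simp [pvDec]
  | cons y ys ih =>
    by_cases ho : pvIsOpen y = true
    · have h' : ∀ b ∈ (false :: st), b = false := by
        intro b hb
        rcases List.mem_cons.mp hb with h1 | h1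
        · exact h1
        · exact h b h1
      rw [pvDec_open y ys st ho, ih _ h']
    · by_cases hcl : y = ")"
      · subst hcl
        cases st with
        | nil => rw [pvDec_close_nil, ih [] (by simp)]
        | cons b st' =>
          have hbf : b = false := h b (by simp)
          subst hbf
          rw [pvDec_close_false, ih st' (fun x hx => h x (List.mem_cons_of_mem _ hx))]
      · rw [pvDec_other y ys st (by simp [ho]) (by simp [hcl]), ih st h]

-- The inner scan over the decorated suffix, started on a fresh (false) top marker with local
-- depth |fs| = |pt| and pending stack fs ++ false :: st, flips that top marker to true (inserts
-- the ')' right before the top open's close) and empties paren_track — provided the balance of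
-- the suffix closes everything (pvBal ys (…) = 0).
theorem pvScan_dec (ys : List String) :
    ∀ (fs st : List Bool) (pt : List Int), pt.length = fs.length →
    (∀ b ∈ fs, b = false) →
    pvBal ys (fs.length + 1 + st.length) = 0 →
    pvScan (pvDec ys (fs ++ false :: st)) pt = (pvDec ys (fs ++ true :: st), []) := by
  induction ys with
  | nil =>
    intro fs st pt _ _ hb
    simp [pvBal] at hb
  | cons y ys ih =>
    intro fs st pt hlen hfs hb
    by_cases ho : pvIsOpen y = true
    · rw [pvDec_open y _ _ ho, pvDec_open y _ _ ho, pvScan_open y _ _ ho]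
      have hb' : pvBal ys ((false :: fs).length + 1 + st.length) = 0 := by
        rw [pvBal_open y ys _ ho] at hb
        have e : (false :: fs).length + 1 + st.length = fs.length + 1 + st.length + 1 := by
          simp only [List.length_cons]
          omega
        rw [e]
        exact hb
      have h2 := ih (false :: fs) st ((1 : Int) :: pt) (by simp [hlen])
        (by intro b hb2
            rcases List.mem_cons.mp hb2 with h1 | h1
            · exact h1
            · exact hfs b h1) hb'
      simp only [List.cons_append] at h2
      rw [h2]
    · by_cases hcl : y = ")"
      · subst hcl
        match fs, pt, hlen with
        | [], [], _ =>
          simp only [List.nil_append]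
          rw [pvDec_close_false, pvDec_close_true, pvScan_close_empty]
        | f :: fs', p :: pt', hlen =>
          have hb' : pvBal ys (fs'.length + 1 + st.length) = 0 := by
            rw [pvBal_close] at hb
            have e : (f :: fs').length + 1 + st.length - 1 = fs'.length + 1 + st.length := by
              simp only [List.length_cons]
              omega
            rw [e] at hb
            exact hb
          have h2 := ih fs' st pt' (by simpa using hlen)
            (fun b hb2 => hfs b (List.mem_cons_of_mem _ hb2)) hb'
          have hf : f = false := hfs f (by simp)
          subst hf
          simp only [List.cons_append]
          rw [pvDec_close_false, pvDec_close_false, pvScan_close_pop, h2]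
      · have ho' : pvIsOpen y = false := by simp [ho]
        have hc' : (y == ")") = false := by simp [hcl]
        rw [pvDec_other y _ _ ho' hc', pvDec_other y _ _ ho' hc', pvScan_other y _ _ ho' hc']
        have hb' : pvBal ys (fs.length + 1 + st.length) = 0 := by
          rw [pvBal_other y ys _ ho' hc'] at hb
          exact hb
        rw [ih fs st pt hlen hfs hb']

-- Main invariant: with every pending open still closable (pvBal ys |st| = 0), A's outer loop on
-- the decorated suffix produces exactly B's output on the plain suffix with marker stack st.
theorem pvOuter_dec (ys : List String) :
    ∀ (st : List Bool), pvBal ys st.length = 0 →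
    pvOuter (pvDec ys st) [] = pvGo ys st := by
  induction ys with
  | nil => intro st _; simp [pvDec, pvOuter, pvGo]
  | cons y ys ih =>
    intro st hb
    by_cases ht : pvIsTrig y = true
    · have ho : pvIsOpen y = true := by simp [pvIsOpen, ht]
      have hb' : pvBal ys ((true :: st).length) = 0 := by
        rw [pvBal_open y ys _ ho] at hb
        simpa using hb
      have hscan := pvScan_dec ys [] st [] rfl (by simp)
        (by simpa [Nat.add_comm] using hb')
      simp only [List.nil_append] at hscan
      rw [pvDec_open y _ _ ho, pvOuter_trig y _ _ ht, hscan]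
      rw [pvOuter_nontrig _ _ _ (by decide)]
      rw [ih (true :: st) hb']
      rw [pvGo_trig y _ _ ht]
    · by_cases ho : pvIsOpen y = true
      · have hb' : pvBal ys ((false :: st).length) = 0 := by
          rw [pvBal_open y ys _ ho] at hb
          simpa using hb
        rw [pvDec_open y _ _ ho, pvOuter_nontrig y _ _ (by simp [ht]), ih (false :: st) hb',
          pvGo_open y _ _ (by simp [ht]) ho]
      · by_cases hcl : y = ")"
        · subst hcl
          cases st with
          | nil =>
            have hb' : pvBal ys 0 = 0 := by
              rw [pvBal_close] at hb
              simpa using hb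
            rw [pvDec_close_nil, pvGo_close_nil, pvOuter_nontrig _ _ _ (by decide), ih [] hb']
          | cons b st' =>
            have hb' : pvBal ys st'.length = 0 := by
              rw [pvBal_close] at hb
              simpa using hb
            cases b with
            | true =>
              rw [pvDec_close_true, pvGo_close_true, pvOuter_nontrig _ _ _ (by decide),
                pvOuter_nontrig _ _ _ (by decide), ih st' hb']
            | false =>
              rw [pvDec_close_false, pvGo_close_false, pvOuter_nontrig _ _ _ (by decide),
                ih st' hb']
        · have ho' : pvIsOpen y = false := by simp [ho]
          have hc' : (y == ")") = false := by simp [hcl]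
          have hb' : pvBal ys st.length = 0 := by
            rw [pvBal_other y ys _ ho' hc'] at hb
            exact hb
          rw [pvDec_other y _ _ ho' hc', pvOuter_nontrig y _ _ (by
            cases h : pvIsTrig y
            · rfl
            · simp [pvIsOpen, h] at ho'), ih st hb',
            pvGo_other y _ _ ho' hc']

-- With at most one trig token A and B agree on every input, balanced or not: A runs at most
-- one scan (started with the empty paren_track), so no leftover depth can ever be consumed.

theorem pvTrigCount_cons (y : String) (ys : List String) :
    pvTrigCount (y :: ys) = (if pvIsTrig y then 1 else 0) + pvTrigCount ys := by
  simp [pvTrigCount, List.countP_cons, Nat.add_comm]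

theorem pvOuter_noTrig (ys : List String) (pt : List Int) (h : pvTrigCount ys = 0) :
    pvOuter ys pt = ys := by
  induction ys generalizing pt with
  | nil => rw [pvOuter]
  | cons y ys ih =>
    have hcnt : pvTrigCount (y :: ys) = (if pvIsTrig y then 1 else 0) + pvTrigCount ys :=
      pvTrigCount_cons y ys
    rw [hcnt] at h
    have ht : pvIsTrig y = false := by
      by_contra hx
      simp only [Bool.not_eq_false] at hx
      rw [hx] at h
      simp at h
    rw [pvOuter_nontrig y ys pt ht, ih pt (by rw [ht] at h; simpa using h)]

theorem pvGo_noTrig (ys : List String) (st : List Bool) (h : pvTrigCount ys = 0)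
    (hst : ∀ b ∈ st, b = false) : pvGo ys st = ys := by
  induction ys generalizing st with
  | nil => rw [pvGo]
  | cons y ys ih =>
    have hcnt : pvTrigCount (y :: ys) = (if pvIsTrig y then 1 else 0) + pvTrigCount ys :=
      pvTrigCount_cons y ys
    rw [hcnt] at h
    have ht : pvIsTrig y = false := by
      by_contra hx
      simp only [Bool.not_eq_false] at hx
      rw [hx] at h
      simp at h
    have h0 : pvTrigCount ys = 0 := by rw [ht] at h; simpa using h
    by_cases ho : pvIsOpen y = true
    · rw [pvGo_open y ys st ht ho, ih (false :: st) h0 (by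
        intro b hb
        rcases List.mem_cons.mp hb with h1 | h1
        · exact h1
        · exact hst b h1)]
    · by_cases hcl : y = ")"
      · subst hcl
        cases st with
        | nil => rw [pvGo_close_nil, ih [] h0 (by simp)]
        | cons b st' =>
          have hbf : b = false := hst b (by simp)
          subst hbf
          rw [pvGo_close_false, ih st' h0 (fun x hx => hst x (List.mem_cons_of_mem _ hx))]
      · rw [pvGo_other y ys st (by simp [ho]) (by simp [hcl]), ih st h0 hst]

-- the scan of the unique trig, over an undecorated trig-free suffix, with |pt| pending local
-- opens mirrored by the all-false fs atop B's stack
theorem pvScan_oneTrig (ys : List String) :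
    ∀ (fs st : List Bool) (pt : List Int), pt.length = fs.length →
    (∀ b ∈ fs, b = false) → (∀ b ∈ st, b = false) → pvTrigCount ys = 0 →
    pvOuter (pvScan ys pt).1 (pvScan ys pt).2 = pvGo ys (fs ++ true :: st) := by
  induction ys with
  | nil =>
    intro fs st pt _ _ _ _
    simp [pvScan, pvOuter, pvGo]
  | cons y ys ih =>
    intro fs st pt hlen hfs hst hcnt
    have hcnt' : pvTrigCount (y :: ys) = (if pvIsTrig y then 1 else 0) + pvTrigCount ys :=
      pvTrigCount_cons y ys
    rw [hcnt'] at hcnt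
    have ht : pvIsTrig y = false := by
      by_contra hx
      simp only [Bool.not_eq_false] at hx
      rw [hx] at hcnt
      simp at hcnt
    have h0 : pvTrigCount ys = 0 := by rw [ht] at hcnt; simpa using hcnt
    by_cases ho : pvIsOpen y = true
    · rw [pvScan_open y ys pt ho]
      rw [pvOuter_nontrig y _ _ ht]
      rw [pvGo_open y _ _ ht ho]
      have := ih (false :: fs) st ((1 : Int) :: pt) (by simp [hlen])
        (by intro b hb
            rcases List.mem_cons.mp hb with h1 | h1
            · exact h1
            · exact hfs b h1) hst h0
      simpa using this
    · by_cases hcl : y = ")"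
      · subst hcl
        match fs, pt, hlen with
        | [], [], _ =>
          rw [pvScan_close_empty]
          rw [pvOuter_nontrig _ _ _ (by decide), pvOuter_nontrig _ _ _ (by decide)]
          rw [pvOuter_noTrig ys [] h0]
          simp only [List.nil_append]
          rw [pvGo_close_true, pvGo_noTrig ys st h0 hst]
        | f :: fs', p :: pt', hlen =>
          have hf : f = false := hfs f (by simp)
          subst hf
          rw [pvScan_close_pop]
          rw [pvOuter_nontrig _ _ _ (by decide)]
          simp only [List.cons_append]
          rw [pvGo_close_false]
          rw [ih fs' st pt' (by simpa using hlen)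
            (fun b hb => hfs b (List.mem_cons_of_mem _ hb)) hst h0]
      · have ho' : pvIsOpen y = false := by simp [ho]
        have hc' : (y == ")") = false := by simp [hcl]
        rw [pvScan_other y ys pt ho' hc']
        rw [pvOuter_nontrig y _ _ ht]
        rw [pvGo_other y _ _ ho' hc']
        rw [ih fs st pt hlen hfs hst h0]

theorem pvOuter_oneTrig (ys : List String) :
    ∀ (st : List Bool), (∀ b ∈ st, b = false) → pvTrigCount ys ≤ 1 →
    pvOuter ys [] = pvGo ys st := by
  induction ys with
  | nil => intro st _ _; simp [pvOuter, pvGo]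
  | cons y ys ih =>
    intro st hst hcnt
    have hcnt' : pvTrigCount (y :: ys) = (if pvIsTrig y then 1 else 0) + pvTrigCount ys :=
      pvTrigCount_cons y ys
    rw [hcnt'] at hcnt
    by_cases ht : pvIsTrig y = true
    · have h0 : pvTrigCount ys = 0 := by rw [ht] at hcnt; simp at hcnt; omega
      rw [pvOuter_trig y ys [] ht]
      rw [pvOuter_nontrig _ _ _ (by decide)]
      rw [pvGo_trig y ys st ht]
      rw [pvScan_oneTrig ys [] st [] rfl (by simp) hst h0]
      simp
    · have h1 : pvTrigCount ys ≤ 1 := by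
        rw [show pvIsTrig y = false by simpa using ht] at hcnt
        simpa using hcnt
      rw [pvOuter_nontrig y ys [] (by simpa using ht)]
      by_cases ho : pvIsOpen y = true
      · rw [pvGo_open y ys st (by simpa using ht) ho, ih (false :: st) (by
          intro b hb
          rcases List.mem_cons.mp hb with hx | hx
          · exact hx
          · exact hst b hx) h1]
      · by_cases hcl : y = ")"
        · subst hcl
          cases st with
          | nil => rw [pvGo_close_nil, ih [] (by simp) h1]
          | cons b st' =>
            have hbf : b = false := hst b (by simp)
            subst hbf
            rw [pvGo_close_false, ih st' (fun x hx => hst x (List.mem_cons_of_mem _ hx)) h1]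
        · rw [pvGo_other y ys st (by simp [ho]) (by simp [hcl]), ih st hst h1]

-- ===== VERDICT (by name: the statement is the Claim_ definition above) =====
theorem degree_mode_spec : Claim_equal_degree_mode := by
  intro expression _ hpre
  unfold Spec_degree_mode degree_mode degree_mode_alt
  unfold Pre_degree_mode at hpre
  cases hpre with
  | inl hbal =>
    have hd : pvDec expression [] = expression := pvDec_allFalse expression [] (by simp)
    have h := pvOuter_dec expression [] hbal
    rw [hd] at h
    exact h
  | inr hone => exact pvOuter_oneTrig expression [] (by simp) hone
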